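-- pv_equiv track=rewrite | github.com/Omitg24/IIS-FI | Python/Ejercicios Repaso Listas.py | change_to_negative
-- ===== SOURCE A (Python) =====
-- def change_to_negative(lista):
--     count=0
--     listan=[]
--     for i in range(len(lista)):
--         if lista[i]>0 and lista[i]%2==0:
--             count=count+1
--             listan.append(lista[i])
--             lista[i]=lista[i]*(-1)
--     return listan, lista
-- ===== SOURCE B (Python) =====
-- def change_to_negative(lista):
--     listan = [x for x in lista if x > 0 and x % 2 == 0]
--     for i, x in enumerate(lista):
--         if x > 0 and x % 2 == 0:
--             lista[i] = -x
--     return listan, lista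
-- ===== Notes on version B (the rewrite author's own statement) =====
-- stated objective: simpler
-- what changed: Replaces A's single fused indexed loop (dead count variable, collect-and-mutate in one body) with two single-purpose passes: a comprehension that collects the positive evens, then an enumerate pass that negates them in place.
import Mathlib
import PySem

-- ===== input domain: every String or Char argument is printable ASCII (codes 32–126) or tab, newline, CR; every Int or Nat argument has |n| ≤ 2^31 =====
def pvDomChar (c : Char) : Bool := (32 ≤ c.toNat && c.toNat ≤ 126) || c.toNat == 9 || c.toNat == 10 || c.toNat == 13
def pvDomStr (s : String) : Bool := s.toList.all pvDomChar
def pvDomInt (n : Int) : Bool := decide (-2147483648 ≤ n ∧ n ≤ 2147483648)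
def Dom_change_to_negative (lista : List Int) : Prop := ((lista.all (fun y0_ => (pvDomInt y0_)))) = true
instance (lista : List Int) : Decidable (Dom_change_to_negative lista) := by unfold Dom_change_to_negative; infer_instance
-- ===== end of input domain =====

-- B splits A's fused collect-and-mutate indexed loop into two single-purpose passes (filter, then negate)
-- and drops the dead count variable; equivalence is about the RETURN value (Python A and B both mutate
-- `lista` in place identically).
-- ===== PORT A =====
-- for i in range(len(lista)): if lista[i]>0 and lista[i]%2==0: count+=1; listan.append(lista[i]); lista[i]=lista[i]*(-1)
def change_to_negative_go (n : Nat) (i : Nat) (count : Int) (listan lista : List Int) :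
    List Int × List Int :=
  if _h : i < n then
    let x := lista.getD i 0  -- lista[i]; in range since set preserves length, so exact
    if x > 0 && PySem.Int.mod x 2 == 0 then
      change_to_negative_go n (i+1) (count+1) (listan ++ [x]) (lista.set i (x * (-1)))
    else
      change_to_negative_go n (i+1) count listan lista
  else (listan, lista)
termination_by n - i

def change_to_negative (lista : List Int) : List Int × List Int :=
  change_to_negative_go lista.length 0 0 [] lista

-- ===== PORT B =====
def change_to_negative_alt (lista : List Int) : List Int × List Int :=
  let listan := lista.filter (fun x => x > 0 && PySem.Int.mod x 2 == 0)
  (listan, lista.map (fun x => if x > 0 && PySem.Int.mod x 2 == 0 then -x else x))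

-- ===== PRECONDITION & SPEC =====
def Spec_change_to_negative (lista : List Int) (out : List Int × List Int) : Prop := out = change_to_negative_alt lista
instance (lista : List Int) (out : List Int × List Int) : Decidable (Spec_change_to_negative lista out) := by unfold Spec_change_to_negative; infer_instance

-- ===== CLAIM (what is proved, stated in full; the proofs are below) =====
def Claim_equal_change_to_negative : Prop := ∀ (lista : List Int), Dom_change_to_negative lista → Spec_change_to_negative lista (change_to_negative lista)

-- ===== LEMMAS AND PROOFS =====

-- ===== VERDICT (by name: the statement is the Claim_ definition above) =====
theorem go_eq (k : Nat) : ∀ (i : Nat) (count : Int) (listan lista : List Int),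
    lista.length - i = k →
    change_to_negative_go lista.length i count listan lista =
      (listan ++ (lista.drop i).filter (fun x => x > 0 && PySem.Int.mod x 2 == 0),
       lista.take i ++ (lista.drop i).map
         (fun x => if x > 0 && PySem.Int.mod x 2 == 0 then -x else x)) := by
  induction k with
  | zero =>
    intro i count listan lista hk
    have hle : lista.length ≤ i := by omega
    rw [change_to_negative_go]
    simp [Nat.not_lt.mpr hle, List.drop_eq_nil_of_le hle, List.take_of_length_le hle]
  | succ k ih =>
    intro i count listan lista hk
    have hi : i < lista.length := by omega
    rw [change_to_negative_go]
    simp only [hi, dif_pos, List.getD_eq_getElem?_getD, List.getElem?_eq_getElem hi,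
      Option.getD_some]
    have hdrop : lista.drop i = lista[i] :: lista.drop (i+1) :=
      List.drop_eq_getElem_cons hi
    by_cases hp : (lista[i] > 0 && PySem.Int.mod lista[i] 2 == 0) = true
    · simp only [hp, if_true]
      have hlen : (lista.set i (lista[i] * (-1))).length = lista.length :=
        List.length_set ..
      rw [← hlen]
      rw [ih (i+1) (count+1) (listan ++ [lista[i]]) _ (by rw [hlen]; omega)]
      rw [List.drop_set, List.take_set]
      simp only [Nat.lt_succ_self, if_pos]
      rw [hdrop, List.filter_cons, List.map_cons]
      simp only [hp, if_true, Prod.mk.injEq]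
      refine ⟨by simp, ?_⟩
      have htake : (lista.take (i+1)).set i (lista[i] * (-1))
          = lista.take i ++ [lista[i] * (-1)] := by
        rw [List.take_succ_eq_append_getElem hi, List.set_append]
        simp [Nat.min_eq_left (Nat.le_of_lt hi)]
      rw [htake, mul_neg_one]
      simp only [List.append_assoc, List.singleton_append]
    · simp only [hp, Bool.false_eq_true, if_false]
      rw [ih (i+1) count listan lista (by omega)]
      rw [hdrop, List.filter_cons, List.map_cons]
      simp only [hp, Bool.false_eq_true, if_false]
      rw [List.take_succ_eq_append_getElem hi]
      simp only [List.append_assoc, List.singleton_append]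

theorem change_to_negative_spec : Claim_equal_change_to_negative := by
  intro lista _
  unfold Spec_change_to_negative change_to_negative change_to_negative_alt
  rw [go_eq lista.length 0 0 [] lista (by omega)]
  simp
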